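-- pv_equiv track=rewrite | github.com/SavageCooPigeonX/keystroke-telemetry | src/tc_grader.py | _prefix_match_len
-- ===== SOURCE A (Python) =====
-- def _prefix_match_len(buffer: str, completion: str) -> int:
--     """How many chars of the completion match what comes after the buffer."""
--     # The completion should continue FROM the buffer's end
--     # Check if completion starts with characters that would naturally follow
--     buf_tail = buffer.rstrip()
--     comp = completion.lstrip()
--     match_len = 0
--     for i, c in enumerate(comp):
--         if i >= len(comp):
--             break
--         match_len = i + 1
--         # Stop at first major divergence
--         if c in '.!?\n' and i > 5:
--             break
--     return match_len
-- ===== SOURCE B (Python) =====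
-- def _prefix_match_len(buffer: str, completion: str) -> int:
--     """How many chars of the completion match what comes after the buffer."""
--     comp = completion.lstrip()
--     # earliest sentence-ender at or after index 6, via one find per ender char
--     hits = [p for p in (comp.find(ch, 6) for ch in '.!?\n') if p >= 0]
--     return min(hits) + 1 if hits else len(comp)
-- ===== Notes on version B (the rewrite author's own statement) =====
-- stated objective: faster
-- what changed: Replaces A's indexed char-by-char Python loop (accumulator + break) by one str.find(ch, 6) per sentence-ender plus a min over the hit positions, falling back to len(comp).
import Mathlib
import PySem

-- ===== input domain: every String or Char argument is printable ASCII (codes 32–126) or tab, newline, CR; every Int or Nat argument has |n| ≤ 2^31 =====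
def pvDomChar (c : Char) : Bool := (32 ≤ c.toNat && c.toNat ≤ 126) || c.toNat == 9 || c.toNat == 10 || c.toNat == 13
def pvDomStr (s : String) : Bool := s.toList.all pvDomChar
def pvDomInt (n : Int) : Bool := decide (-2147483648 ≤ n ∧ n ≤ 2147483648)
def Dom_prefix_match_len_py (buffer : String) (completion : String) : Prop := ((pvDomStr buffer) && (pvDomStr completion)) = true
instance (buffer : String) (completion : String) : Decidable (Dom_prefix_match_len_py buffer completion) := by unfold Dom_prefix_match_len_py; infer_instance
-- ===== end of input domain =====

-- B replaces A's char-by-char scan (accumulator + break) with one find(ch, 6) per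
-- sentence-ender and a min over the hit positions (objective: faster by a constant
-- factor — C-level find instead of a Python-level loop, measured).

-- ===== PORT A =====
-- Python 'c in ".!?\n"' (single char in a string literal) = list membership of the char; exact.
def pvEnds (c : Char) : Bool := ".!?\n".toList.contains c

-- A's 'for i, c in enumerate(comp)' loop with break, carrying match_len; n = len(comp)
def pvALoop : List Char → Nat → Nat → Int → Int
  | [], _, _, ml => ml
  | c :: rest, i, n, ml =>
    if n ≤ i then ml                      -- 'if i >= len(comp): break' (never fires)
    else
      let ml' : Int := (i : Int) + 1      -- 'match_len = i + 1'
      if pvEnds c ∧ 5 < i then ml'        -- 'if c in ".!?\n" and i > 5: break'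
      else pvALoop rest (i + 1) n ml'

def prefix_match_len_py (buffer : String) (completion : String) : Int :=
  let _buf_tail := PySem.Chars.rstrip buffer.toList   -- buf_tail = buffer.rstrip()  (unused, as in A)
  let comp := PySem.Chars.lstrip completion.toList
  pvALoop comp 0 comp.length 0

-- ===== PORT B =====
def prefix_match_len_py_alt (buffer : String) (completion : String) : Int :=
  let comp := PySem.Chars.lstrip completion.toList
  let hits := ['.', '!', '?', '\n'].filterMap (fun ch =>
    let p := PySem.Chars.findFrom comp [ch] 6         -- comp.find(ch, 6)
    if 0 ≤ p then some p else none)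
  match PySem.List.min? hits id with                  -- min(hits) + 1 if hits else len(comp)
  | some m => m + 1
  | none => (comp.length : Int)

-- ===== PRECONDITION & SPEC =====
def Spec_prefix_match_len_py (buffer : String) (completion : String) (out : Int) : Prop := out = prefix_match_len_py_alt buffer completion
instance (buffer : String) (completion : String) (out : Int) : Decidable (Spec_prefix_match_len_py buffer completion out) := by unfold Spec_prefix_match_len_py; infer_instance

-- ===== CLAIM (what is proved, stated in full; the proofs are below) =====
def Claim_equal_prefix_match_len_py : Prop := ∀ (buffer : String) (completion : String), Dom_prefix_match_len_py buffer completion → Spec_prefix_match_len_py buffer completion (prefix_match_len_py buffer completion)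

-- ===== LEMMAS AND PROOFS =====

-- first index i with comp[i] a sentence-ender and i > 5, as A's loop finds it
def pvFindE : List Char → Nat → Option Nat
  | [], _ => none
  | c :: rest, i => if pvEnds c ∧ 5 < i then some i else pvFindE rest (i + 1)

theorem pvALoop_eq (cs : List Char) (i : Nat) (ml : Int) (n : Nat) (h : i + cs.length = n) :
    pvALoop cs i n ml = (match pvFindE cs i with
      | some j => (j : Int) + 1
      | none => if cs.isEmpty then ml else (n : Int)) := by
  induction cs generalizing i ml with
  | nil => simp [pvALoop, pvFindE]
  | cons c rest ih =>
    simp only [pvALoop, pvFindE]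
    have hlt : ¬ n ≤ i := by simp at h; omega
    rw [if_neg hlt]
    by_cases hc : pvEnds c ∧ 5 < i
    · simp [hc]
    · rw [if_neg hc, if_neg hc, ih (i + 1) _ (by simp at h ⊢; omega)]
      cases rest with
      | nil =>
        simp only [pvFindE, List.isEmpty_nil, List.isEmpty_cons]
        simp at h
        subst h
        norm_num
      | cons d t => rfl

theorem pvFindE_high (cs : List Char) (i : Nat) (h : 6 ≤ i) :
    pvFindE cs i = (if cs.findIdx pvEnds < cs.length then some (i + cs.findIdx pvEnds) else none) := by
  induction cs generalizing i with
  | nil => simp [pvFindE]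
  | cons c rest ih =>
    simp only [pvFindE]
    by_cases hc : pvEnds c
    · simp [hc, List.findIdx_cons, Nat.lt_of_lt_of_le (by omega : 5 < 6) h]
    · rw [if_neg (by simp [hc]), ih (i + 1) (by omega)]
      simp only [List.findIdx_cons, hc, cond_false, List.length_cons]
      by_cases hlt : rest.findIdx pvEnds < rest.length
      · rw [if_pos hlt, if_pos (by omega)]
        congr 1; omega
      · rw [if_neg hlt, if_neg (by omega)]

theorem pvFindE_low (cs : List Char) (i : Nat) (h : i < 6) :
    pvFindE cs i = pvFindE (cs.drop (6 - i)) 6 := by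
  induction cs generalizing i with
  | nil => simp [pvFindE]
  | cons c rest ih =>
    have hni : ¬ (pvEnds c ∧ 5 < i) := fun hcc => absurd hcc.2 (by omega)
    simp only [pvFindE, if_neg hni]
    by_cases h5 : i = 5
    · subst h5; simp
    · rw [ih (i + 1) (by omega)]
      have : 6 - i = (6 - (i + 1)) + 1 := by omega
      rw [this, List.drop_succ_cons]

theorem singleton_prefix_drop (l : List Char) (c : Char) (m : Nat) :
    ([c] <+: l.drop m) ↔ l[m]? = some c := by
  constructor
  · rintro ⟨t, ht⟩
    have : (l.drop m)[0]? = some c := by rw [← ht]; rfl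
    simpa [List.getElem?_drop] using this
  · intro h
    have h0 : (l.drop m)[0]? = some c := by simpa [List.getElem?_drop] using h
    rcases List.getElem?_eq_some_iff.mp h0 with ⟨hl, he⟩
    exact ⟨(l.drop m).tail, by rw [← he]; simp [List.getElem_zero_eq_head hl]⟩

theorem findFrom6 (s sub : List Char) :
    PySem.Chars.findFrom s sub 6 =
      (if 6 ≤ s.length ∧ 0 ≤ PySem.Chars.find (s.drop 6) sub
       then 6 + PySem.Chars.find (s.drop 6) sub else -1) := by
  have hge : -1 ≤ PySem.Chars.find (List.drop 6 s) sub := PySem.Chars.neg_one_le_find _ _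
  simp only [PySem.Chars.findFrom]
  norm_num
  rw [show (Int.toNat 6) = 6 from rfl]
  by_cases hl : s.length < 6
  · rw [if_pos hl, if_neg (by omega)]
  · rw [if_neg hl]
    by_cases hr : PySem.Chars.find (List.drop 6 s) sub = -1
    · rw [if_pos hr, if_neg (by omega)]
    · rw [if_neg hr, if_pos ⟨by omega, by omega⟩]

theorem pvEnds_iff (c : Char) : pvEnds c = true ↔ c ∈ ['.', '!', '?', '\n'] := by
  have : ".!?\n".toList = ['.', '!', '?', '\n'] := rfl
  simp [pvEnds, this]

-- the whole equivalence, over the (already lstripped) character list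
theorem pvCore (cs : List Char) :
    pvALoop cs 0 cs.length 0 =
      (match PySem.List.min? (['.', '!', '?', '\n'].filterMap (fun ch =>
          let p := PySem.Chars.findFrom cs [ch] 6
          if 0 ≤ p then some p else none)) (id : Int → Int) with
       | some m => m + 1
       | none => (cs.length : Int)) := by
  rw [pvALoop_eq cs 0 0 cs.length (by simp)]
  rw [pvFindE_low cs 0 (by omega)]
  simp only [Nat.sub_zero]
  set d := cs.drop 6 with hd
  rw [pvFindE_high d 6 (le_refl 6)]
  set hits := (['.', '!', '?', '\n'].filterMap (fun ch =>
      let p := PySem.Chars.findFrom cs [ch] 6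
      if 0 ≤ p then some p else none)) with hhits
  by_cases hex : d.findIdx pvEnds < d.length
  · -- an ender exists at some index ≥ 6
    set t := d.findIdx pvEnds with htdef
    have hend : pvEnds d[t] = true := List.findIdx_getElem (w := hex)
    have hmin : ∀ k (hk : k < d.length), k < t → pvEnds d[k] = false := by
      intro k hk hkt; exact List.not_of_lt_findIdx hkt
    have hlen6 : 6 ≤ cs.length := by
      have hdl : d.length = cs.length - 6 := by rw [hd, List.length_drop]
      omega
    -- find d [ch] = t for ch = d[t]
    have hfindt : PySem.Chars.find d [d[t]] = (t : Int) := by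
      have hmem : d[t] ∈ d := List.getElem_mem _
      have hnn : 0 ≤ PySem.Chars.find d [d[t]] :=
        (PySem.Chars.find_nonneg_iff _ _).mpr ((List.singleton_infix_iff _ _).mpr hmem)
      obtain ⟨hpre, hminf⟩ := PySem.Chars.find_spec hnn
      set f := (PySem.Chars.find d [d[t]]).toNat with hf
      have hdf : d[f]? = some d[t] := (singleton_prefix_drop d _ f).mp hpre
      have hfle : f ≤ t := by
        by_contra hgt
        exact hminf t (by omega) ((singleton_prefix_drop d _ t).mpr (List.getElem?_eq_getElem hex))
      have hflen : f < d.length := (List.getElem?_eq_some_iff.mp hdf).1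
      have htle : t ≤ f := by
        by_contra hlt
        have : pvEnds d[f] = false := hmin f hflen (by omega)
        rw [(List.getElem?_eq_some_iff.mp hdf).2] at this
        rw [hend] at this; exact absurd this (by simp)
      have : f = t := le_antisymm hfle htle
      omega
    have hmemlist : d[t] ∈ ['.', '!', '?', '\n'] := (pvEnds_iff _).mp hend
    -- (6 + t) is a hit
    have hjmem : ((6 : Int) + t) ∈ hits := by
      rw [hhits]
      refine List.mem_filterMap.mpr ⟨d[t], hmemlist, ?_⟩
      show (if 0 ≤ PySem.Chars.findFrom cs [d[t]] 6 then some (PySem.Chars.findFrom cs [d[t]] 6) else none) = some ((6 : Int) + t)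
      have hcond : 6 ≤ cs.length ∧ 0 ≤ (t : Int) := ⟨hlen6, by omega⟩
      rw [findFrom6, ← hd, hfindt, if_pos hcond, if_pos (by omega : (0:Int) ≤ 6 + t)]
    -- every hit is ≥ 6 + t
    have hlb : ∀ x ∈ hits, (6 : Int) + t ≤ x := by
      intro x hx
      rw [hhits] at hx
      obtain ⟨ch, hch, hsome⟩ := List.mem_filterMap.mp hx
      have hsome' : (if 0 ≤ PySem.Chars.findFrom cs [ch] 6 then some (PySem.Chars.findFrom cs [ch] 6) else none) = some x := hsome
      rw [findFrom6, ← hd] at hsome'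
      clear hsome
      split at hsome'
      · next hcond =>
        rw [if_pos (by omega)] at hsome'
        injection hsome' with hx
        subst hx
        obtain ⟨hpre, -⟩ := PySem.Chars.find_spec hcond.2
        set f := (PySem.Chars.find d [ch]).toNat with hf
        have hdf : d[f]? = some ch := (singleton_prefix_drop d _ f).mp hpre
        have hflen : f < d.length := (List.getElem?_eq_some_iff.mp hdf).1
        have hendf : pvEnds d[f] = true := by
          rw [(List.getElem?_eq_some_iff.mp hdf).2]; exact (pvEnds_iff ch).mpr hch
        have : t ≤ f := by
          by_contra hlt
          rw [hmin f hflen (by omega)] at hendf; exact absurd hendf (by simp)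
        omega
      · rw [if_neg (by omega)] at hsome'; exact absurd hsome' (by simp)
    obtain ⟨m, hm⟩ : ∃ m, PySem.List.min? hits (id : Int → Int) = some m := by
      cases hcase : PySem.List.min? hits (id : Int → Int) with
      | none => exact absurd ((PySem.List.min?_eq_none_iff hits _).mp hcase ▸ hjmem) (List.not_mem_nil)
      | some m => exact ⟨m, rfl⟩
    have hmval : m = (6 : Int) + t :=
      le_antisymm (PySem.List.min?_isMin hm _ hjmem) (hlb m (PySem.List.min?_mem hm))
    rw [if_pos hex, hm, hmval]
    push_cast
    ring
  · -- no ender at index ≥ 6: all finds miss, hits is empty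
    have hnone : ∀ c ∈ d, pvEnds c = false := by
      intro c hc
      by_contra hne
      have : pvEnds c = true := by simpa using hne
      exact hex (List.findIdx_lt_length_of_exists ⟨c, hc, this⟩)
    have hempty : hits = [] := by
      rw [hhits]
      refine List.filterMap_eq_nil_iff.mpr ?_
      intro ch hch
      have hnf : PySem.Chars.find d [ch] = -1 := by
        rw [PySem.Chars.find_eq_neg_one_iff]
        intro hinf
        have : ch ∈ d := (List.singleton_infix_iff _ _).mp hinf
        have := hnone ch this
        rw [(pvEnds_iff ch).mpr hch] at this; exact absurd this (by simp)
      show (if 0 ≤ PySem.Chars.findFrom cs [ch] 6 then some (PySem.Chars.findFrom cs [ch] 6) else none) = none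
      rw [findFrom6, ← hd, hnf]
      norm_num
    rw [if_neg hex, hempty]
    simp only [PySem.List.min?, List.foldl_nil]
    cases cs <;> simp

-- ===== VERDICT (by name: the statement is the Claim_ definition above) =====
theorem prefix_match_len_py_spec : Claim_equal_prefix_match_len_py := by
  intro buffer completion _
  unfold Spec_prefix_match_len_py prefix_match_len_py prefix_match_len_py_alt
  exact pvCore _
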